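-- pv_equiv track=rewrite | github.com/ImHereForTheCookies/kofta | util/generators.py | number_generator
-- ===== SOURCE A (Python) =====
-- def is_prime(n):
--     # Corner cases
--     if n <= 1:
--         return False
--     if n <= 3:
--         return True
--
--     # This is checked so that we can skip the middle five numbers in the loop below
--     if n % 2 == 0 or n % 3 == 0:
--         return False
--
--     i = 5
--     while i * i <= n:
--         if n % i == 0 or n % (i + 2) == 0:
--             return False
--         i = i + 6
--
--     return True
--
-- def nearest_prime(num: int, round_down=True):
--     if type(num) is not int:
--         Warning("Provided non integer. Converting...")
--         num = int(num)
--
--     while not is_prime(num):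
--         if round_down:
--             num -= 1
--         else:
--             num += 1
--     return num
--
-- def number_generator(upper_bound: int, lower_bound: int = 0, add_on_val=0, repeats=False):
--     """
--     Generates all unique numbers between lower_bound and upper_bound exactly once in a somewhat random way. Upper bound
--     is rounded down to the nearest prime.
--     Args:
--         upper_bound: Highest value to generate (rounded down to the nearest prime)
--         lower_bound: Lowest value to generate
--         add_on_val: How far to shift the values up (i.e. shift 1e10 for phone number to all have length 10)
--         repeats: Whether or not to keep generating numbers after all numbers in the range have been exhausted
--
--     Returns:
--         Returns a generator for generating numbers as message come in.
--     """
--     upper_bound = nearest_prime(upper_bound)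
--     current = seed_number = nearest_prime(upper_bound * 3 // 4)
--     counter = 0
--     while repeats or counter < upper_bound:
--         yield current + add_on_val
--         current = current + seed_number % upper_bound
--         counter += 1
--         while current < lower_bound:
--             current = current + seed_number % upper_bound
--             counter += 1
-- ===== SOURCE B (Python) =====
-- def _has_factor(n, d):
--     # naive trial division: smallest-candidate scan from d upward
--     while d * d <= n:
--         if n % d == 0:
--             return True
--         d += 1
--     return False
--
-- def _prime(n):
--     return n >= 2 and not _has_factor(n, 2)
--
-- def _prev_prime(n):
--     while not _prime(n):
--         n -= 1
--     return n
--
-- def number_generator(upper_bound: int, lower_bound: int = 0, add_on_val=0, repeats=False):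
--     # The step of the original loop is the constant seed % upper_bound == seed, so the
--     # values form the arithmetic progression seed*(i+1); the skip below lower_bound is
--     # a one-time closed-form jump, and primality is tested by naive trial division
--     # instead of the 6k+-1 wheel.
--     p = _prev_prime(upper_bound)
--     seed = _prev_prime(p * 3 // 4)
--     yield seed + add_on_val  # the first value is emitted even when below lower_bound
--     # i = smallest counter value >= 1 whose value seed*(i+1) reaches lower_bound
--     i = max(1, -((seed - lower_bound) // seed))
--     while repeats or i < p:
--         yield seed * (i + 1) + add_on_val
--         i += 1
-- ===== Notes on version B (the rewrite author's own statement) =====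
-- stated objective: alternative
-- what changed: Replaces the current/counter state machine with its inner skip-while loop by the closed form seed*(i+1)+add_on_val over a range (the skip count is one floor division), and tests primality by naive trial division from 2 instead of the 6k+/-1 wheel with separate 2/3 checks.
import Mathlib
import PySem

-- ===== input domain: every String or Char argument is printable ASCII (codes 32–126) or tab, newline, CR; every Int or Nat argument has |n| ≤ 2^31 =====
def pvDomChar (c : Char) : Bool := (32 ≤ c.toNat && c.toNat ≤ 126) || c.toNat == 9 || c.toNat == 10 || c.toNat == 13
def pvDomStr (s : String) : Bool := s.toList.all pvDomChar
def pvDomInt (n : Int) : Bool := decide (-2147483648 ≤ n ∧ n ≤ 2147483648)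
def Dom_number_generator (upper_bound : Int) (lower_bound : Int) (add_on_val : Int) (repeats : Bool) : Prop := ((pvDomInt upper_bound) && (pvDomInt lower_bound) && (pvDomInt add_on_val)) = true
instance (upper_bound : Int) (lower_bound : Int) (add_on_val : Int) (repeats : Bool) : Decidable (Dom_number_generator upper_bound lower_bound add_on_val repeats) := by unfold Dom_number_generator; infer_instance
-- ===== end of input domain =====

-- B replaces A's current/counter state machine and its inner skip-while loop by the
-- arithmetic progression seed*(i+1) over a range with a closed-form one-time skip count,
-- and tests primality by naive trial division instead of the 6k±1 wheel (objective:
-- alternative).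

-- ===== PORT A =====
-- termination measures of A's loops, as named lemmas cited by the ports
theorem pvDecIsPrimeLoop (n i : Int) (h : i * i ≤ n) : (n + 1 - (i + 6)).toNat < (n + 1 - i).toNat := by
  have h2 : i ≤ i * i := by nlinarith [sq_nonneg i, sq_nonneg (i - 1)]
  omega
theorem pvDecNearest (num : Int) (h : ¬ num ≤ 1) : (num - 1).toNat < num.toNat := by omega
theorem pvDecSkip (lb c s : Int) (h : c < lb ∧ 0 < s) : (lb - (c + s)).toNat < (lb - c).toNat := by omega
theorem pvDecOuter (ub c2 counter : Int) (h : counter < ub) (h2 : counter + 1 ≤ c2) :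
    (ub - c2).toNat < (ub - counter).toNat := by omega

-- is_prime's trial loop: while i*i <= n: ...; i = i + 6
def isPrimeLoop (n : Int) (i : Int) : Bool :=
  if _h : i * i ≤ n then
    if PySem.Int.mod n i = 0 ∨ PySem.Int.mod n (i + 2) = 0 then false
    else isPrimeLoop n (i + 6)
  else true
termination_by (n + 1 - i).toNat
decreasing_by exact pvDecIsPrimeLoop n i _h

def isPrime (n : Int) : Bool :=
  if n ≤ 1 then false
  else if n ≤ 3 then true
  else if PySem.Int.mod n 2 = 0 ∨ PySem.Int.mod n 3 = 0 then false
  else isPrimeLoop n 5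

-- nearest_prime with round_down=True (the only way A calls it).
-- The 'num ≤ 1' branch is a totality guard: there Python's while loop never terminates.
def nearestPrimeDown (num : Int) : Int :=
  if isPrime num then num
  else if _h : num ≤ 1 then num
  else nearestPrimeDown (num - 1)
termination_by num.toNat
decreasing_by exact pvDecNearest num _h

-- inner 'while current < lower_bound' loop; '0 < step' is a totality guard
-- (Python diverges when the step is not positive, which cannot happen inside Pre_)
def skipA (lb step : Int) (current counter : Int) : Int × Int :=
  if _h : current < lb ∧ 0 < step then skipA lb step (current + step) (counter + 1)
  else (current, counter)
termination_by (lb - current).toNat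
decreasing_by exact pvDecSkip lb current step _h

-- counter never decreases through the inner loop (needed for the outer loop's termination)
theorem skipA_counter_le (lb step : Int) (current counter : Int) :
    counter ≤ (skipA lb step current counter).2 := by
  induction current, counter using skipA.induct lb step with
  | case1 current counter h ih => rw [skipA, dif_pos h]; omega
  | case2 current counter h => rw [skipA, dif_neg h]

-- outer 'while repeats or counter < upper_bound' loop; repeats = true diverges in
-- Python and is outside Pre_, so the port loops only on the 'counter < ub' condition
def outerA (ub lb add seed : Int) (current counter : Int) : List Int :=
  if _h : counter < ub then
    (current + add) ::
      outerA ub lb add seed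
        (skipA lb (PySem.Int.mod seed ub) (current + PySem.Int.mod seed ub) (counter + 1)).1
        (skipA lb (PySem.Int.mod seed ub) (current + PySem.Int.mod seed ub) (counter + 1)).2
  else []
termination_by (ub - counter).toNat
decreasing_by
  exact pvDecOuter ub _ counter _h
    (skipA_counter_le lb (PySem.Int.mod seed ub) (current + PySem.Int.mod seed ub) (counter + 1))

def number_generator (upper_bound : Int) (lower_bound : Int) (add_on_val : Int) (repeats : Bool) : List Int :=
  -- 'repeats = true' yields forever in Python (the sequence never ends); totality guard, outside Pre_
  if repeats then []
  else
    let ub := nearestPrimeDown upper_bound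
    let seed := nearestPrimeDown (PySem.Int.floordiv (ub * 3) 4)
    outerA ub lower_bound add_on_val seed seed 0

-- ===== PORT B =====
-- termination measure of B's trial-division scan, cited by the port
theorem pvDecHasFactor (n d : Int) (h : d * d ≤ n) : (n + 1 - (d + 1)).toNat < (n + 1 - d).toNat := by
  have h2 : d ≤ d * d := by nlinarith [sq_nonneg d, sq_nonneg (d - 1)]
  omega

-- _has_factor: while d*d <= n: if n % d == 0: return True; d += 1; return False
def hasFactor (n : Int) (d : Int) : Bool :=
  if _h : d * d ≤ n then
    if PySem.Int.mod n d = 0 then true else hasFactor n (d + 1)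
  else false
termination_by (n + 1 - d).toNat
decreasing_by exact pvDecHasFactor n d _h

def primeB (n : Int) : Bool := decide (2 ≤ n) && !(hasFactor n 2)

-- _prev_prime; the 'num ≤ 1' branch is a totality guard (Python's loop never terminates there)
def prevPrime (num : Int) : Int :=
  if primeB num then num
  else if _h : num ≤ 1 then num
  else prevPrime (num - 1)
termination_by num.toNat
decreasing_by exact pvDecNearest num _h

def number_generator_alt (upper_bound : Int) (lower_bound : Int) (add_on_val : Int) (repeats : Bool) : List Int :=
  let p := prevPrime upper_bound
  let seed := prevPrime (PySem.Int.floordiv (p * 3) 4)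
  let i0 := max 1 (-(PySem.Int.floordiv (seed - lower_bound) seed))
  -- 'repeats = true' yields forever in Python B as well; totality guard, outside Pre_
  if repeats then [seed + add_on_val]
  else (seed + add_on_val) :: (PySem.List.pyRange i0 p 1).map (fun i => seed * (i + 1) + add_on_val)

-- ===== PRECONDITION & SPEC =====
-- Pre_ excludes exactly the inputs where the Python A never returns a finite sequence:
-- upper_bound < 3 makes a nearest_prime round-down loop decrement forever, and
-- repeats=True makes the generator yield forever.
def Pre_number_generator (upper_bound : Int) (lower_bound : Int) (add_on_val : Int) (repeats : Bool) : Prop :=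
  3 ≤ upper_bound ∧ repeats = false
instance (upper_bound : Int) (lower_bound : Int) (add_on_val : Int) (repeats : Bool) : Decidable (Pre_number_generator upper_bound lower_bound add_on_val repeats) := by unfold Pre_number_generator; infer_instance

def pvWitness_number_generator : Int × Int × Int × Bool := (11, 5, 100, false)

def Spec_number_generator (upper_bound : Int) (lower_bound : Int) (add_on_val : Int) (repeats : Bool) (out : List Int) : Prop := out = number_generator_alt upper_bound lower_bound add_on_val repeats
instance (upper_bound : Int) (lower_bound : Int) (add_on_val : Int) (repeats : Bool) (out : List Int) : Decidable (Spec_number_generator upper_bound lower_bound add_on_val repeats out) := by unfold Spec_number_generator; infer_instance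

-- ===== CLAIM (what is proved, stated in full; the proofs are below) =====
def Claim_equal_number_generator : Prop := ∀ (upper_bound : Int) (lower_bound : Int) (add_on_val : Int) (repeats : Bool), Dom_number_generator upper_bound lower_bound add_on_val repeats → Pre_number_generator upper_bound lower_bound add_on_val repeats → Spec_number_generator upper_bound lower_bound add_on_val repeats (number_generator upper_bound lower_bound add_on_val repeats)

-- ===== LEMMAS AND PROOFS =====

-- the common characterization both primality tests are proved against
def HasSmallDiv (n : Int) : Prop := ∃ d : Int, 2 ≤ d ∧ d * d ≤ n ∧ d ∣ n

-- B's scan finds a factor iff a trial divisor ≥ d with square ≤ n divides n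
theorem hasFactor_iff (n : Int) : ∀ d : Int, 2 ≤ d →
    (hasFactor n d = true ↔ ∃ e : Int, d ≤ e ∧ e * e ≤ n ∧ e ∣ n) := by
  intro d
  induction d using hasFactor.induct n with
  | case1 d hle hm =>
    intro _
    rw [hasFactor, dif_pos hle, if_pos hm]
    simp only [true_iff]
    exact ⟨d, le_refl d, hle, (PySem.Int.mod_eq_zero_iff_dvd n d).mp hm⟩
  | case2 d hle hm ih =>
    intro h2
    rw [hasFactor, dif_pos hle, if_neg hm, ih (by omega)]
    constructor
    · rintro ⟨e, he1, he2, he3⟩; exact ⟨e, by omega, he2, he3⟩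
    · rintro ⟨e, he1, he2, he3⟩
      refine ⟨e, ?_, he2, he3⟩
      rcases (by omega : e = d ∨ d + 1 ≤ e) with rfl | h
      · exact absurd ((PySem.Int.mod_eq_zero_iff_dvd n e).mpr he3) hm
      · exact h
  | case3 d hle =>
    intro h2
    rw [hasFactor, dif_neg hle]
    simp only [Bool.false_eq_true, false_iff]
    rintro ⟨e, he1, he2, -⟩
    exact hle (by nlinarith)

theorem primeB_iff (n : Int) : primeB n = true ↔ (2 ≤ n ∧ ¬ HasSmallDiv n) := by
  rw [primeB]
  by_cases h2 : 2 ≤ n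
  · simp only [h2, decide_true, Bool.true_and, Bool.not_eq_eq_eq_not, Bool.not_true,
      true_and]
    rw [← Bool.not_eq_true, not_iff_not, hasFactor_iff n 2 (le_refl 2)]
    unfold HasSmallDiv
    exact ⟨fun ⟨e, a, b, c⟩ => ⟨e, a, b, c⟩, fun ⟨e, a, b, c⟩ => ⟨e, a, b, c⟩⟩
  · simp [h2]

-- if A's wheel loop returns false, n has a divisor d with 2 ≤ d and d*d ≤ n
-- (the i+2 probe may exceed √n; its cofactor is then the small divisor)
theorem isPrimeLoop_false_smalldiv (n : Int) : ∀ i : Int, 5 ≤ i →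
    isPrimeLoop n i = false → HasSmallDiv n := by
  intro i
  induction i using isPrimeLoop.induct n with
  | case1 i hle hm =>
    intro h5 _
    rcases hm with hm | hm
    · exact ⟨i, by omega, hle, (PySem.Int.mod_eq_zero_iff_dvd n i).mp hm⟩
    · have hdvd : (i + 2) ∣ n := (PySem.Int.mod_eq_zero_iff_dvd n (i + 2)).mp hm
      by_cases hbig : (i + 2) * (i + 2) ≤ n
      · exact ⟨i + 2, by omega, hbig, hdvd⟩
      · obtain ⟨c, hc⟩ := hdvd
        have hcpos : 2 ≤ c := by nlinarith
        refine ⟨c, hcpos, by nlinarith, ⟨i + 2, by linarith [hc]⟩⟩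
  | case2 i hle hm ih =>
    intro h5 hf
    rw [isPrimeLoop, dif_pos hle, if_neg hm] at hf
    exact ih (by omega) hf
  | case3 i hle =>
    intro _ hf
    rw [isPrimeLoop, dif_neg hle] at hf
    exact absurd hf (by simp)

-- if A's wheel loop returns true, no d ≥ i with d*d ≤ n divides n
-- (candidates skipped by the wheel are divisible by 2 or 3, impossible for divisors of n)
theorem isPrimeLoop_true_nodiv (n : Int) (h2 : ¬ (2:Int) ∣ n) (h3 : ¬ (3:Int) ∣ n) :
    ∀ i : Int, 5 ≤ i → i % 6 = 5 → isPrimeLoop n i = true →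
      ∀ d : Int, i ≤ d → d * d ≤ n → ¬ d ∣ n := by
  intro i
  induction i using isPrimeLoop.induct n with
  | case1 i hle hm =>
    intro h5 h6 ht d hid hdd hdvd
    rw [isPrimeLoop, dif_pos hle, if_pos hm] at ht
    exact absurd ht (by simp)
  | case2 i hle hm ih =>
    intro h5 h6 ht d hid hdd hdvd
    rw [isPrimeLoop, dif_pos hle, if_neg hm] at ht
    push_neg at hm
    rcases (by omega : d = i ∨ d = i + 1 ∨ d = i + 2 ∨ d = i + 3 ∨ d = i + 4 ∨ d = i + 5 ∨ i + 6 ≤ d)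
      with rfl | rfl | rfl | rfl | rfl | rfl | hrec
    · exact hm.1 ((PySem.Int.mod_eq_zero_iff_dvd n d).mpr hdvd)
    · exact h2 (dvd_trans (by omega : (2:Int) ∣ i + 1) hdvd)
    · exact hm.2 ((PySem.Int.mod_eq_zero_iff_dvd n (i + 2)).mpr hdvd)
    · exact h2 (dvd_trans (by omega : (2:Int) ∣ i + 3) hdvd)
    · exact h3 (dvd_trans (by omega : (3:Int) ∣ i + 4) hdvd)
    · exact h2 (dvd_trans (by omega : (2:Int) ∣ i + 5) hdvd)
    · exact ih (by omega) (by omega) ht d hrec hdd hdvd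
  | case3 i hle =>
    intro h5 h6 ht d hid hdd hdvd
    have : 5 ≤ d := by omega
    exact hle (by nlinarith)

theorem isPrime_iff (n : Int) : isPrime n = true ↔ (2 ≤ n ∧ ¬ HasSmallDiv n) := by
  rw [isPrime]
  by_cases h1 : n ≤ 1
  · simp only [h1, if_true]
    constructor
    · intro h; exact absurd h (by simp)
    · intro h; omega
  rw [if_neg h1]
  by_cases h3 : n ≤ 3
  · simp only [h3, if_true, true_iff]
    refine ⟨by omega, ?_⟩
    rintro ⟨d, hd1, hd2, -⟩; nlinarith
  rw [if_neg h3]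
  by_cases hm : PySem.Int.mod n 2 = 0 ∨ PySem.Int.mod n 3 = 0
  · rw [if_pos hm]
    simp only [Bool.false_eq_true, false_iff, not_and, not_not]
    intro _
    by_cases h2d : (2:Int) ∣ n
    · exact ⟨2, by norm_num, by nlinarith, h2d⟩
    · rcases hm with hm | hm
      · exact absurd ((PySem.Int.mod_eq_zero_iff_dvd n 2).mp hm) h2d
      · have hd : (3:Int) ∣ n := (PySem.Int.mod_eq_zero_iff_dvd n 3).mp hm
        refine ⟨3, by norm_num, ?_, hd⟩
        obtain ⟨c, hc⟩ := hd; omega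
  · rw [if_neg hm]
    push_neg at hm
    have hnd2 : ¬ (2:Int) ∣ n := fun h => hm.1 ((PySem.Int.mod_eq_zero_iff_dvd n 2).mpr h)
    have hnd3 : ¬ (3:Int) ∣ n := fun h => hm.2 ((PySem.Int.mod_eq_zero_iff_dvd n 3).mpr h)
    constructor
    · intro ht
      refine ⟨by omega, ?_⟩
      rintro ⟨d, hd1, hd2, hd3⟩
      rcases (by omega : d = 2 ∨ d = 3 ∨ d = 4 ∨ 5 ≤ d) with rfl | rfl | rfl | h5
      · exact hnd2 hd3
      · exact hnd3 hd3
      · exact hnd2 (dvd_trans (by omega) hd3)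
      · exact isPrimeLoop_true_nodiv n hnd2 hnd3 5 (le_refl 5) (by decide) ht d (by omega) hd2 hd3
    · rintro ⟨-, hno⟩
      by_contra hf
      exact hno (isPrimeLoop_false_smalldiv n 5 (le_refl 5) (by simpa using hf))

-- the two primality tests agree everywhere, hence the two downward searches do too
theorem isPrime_eq_primeB (n : Int) : isPrime n = primeB n :=
  Bool.eq_iff_iff.mpr ((isPrime_iff n).trans (primeB_iff n).symm)

theorem prevPrime_eq (num : Int) : prevPrime num = nearestPrimeDown num := by
  induction num using prevPrime.induct with
  | case1 n hp =>
    rw [prevPrime, if_pos hp, nearestPrimeDown, if_pos (by rw [isPrime_eq_primeB]; exact hp)]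
  | case2 n hp h1 =>
    rw [prevPrime, if_neg hp, dif_pos h1,
        nearestPrimeDown, if_neg (by rw [isPrime_eq_primeB]; exact hp), dif_pos h1]
  | case3 n hp h1 ih =>
    rw [prevPrime, if_neg hp, dif_neg h1,
        nearestPrimeDown, if_neg (by rw [isPrime_eq_primeB]; exact hp), dif_neg h1, ih]

-- nearest_prime round-down stays in [2, num] for num ≥ 2 (it stops at 2 at the latest)
theorem nearestPrimeDown_bounds (num : Int) (h : 2 ≤ num) :
    2 ≤ nearestPrimeDown num ∧ nearestPrimeDown num ≤ num := by
  induction num using nearestPrimeDown.induct with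
  | case1 n hp => rw [nearestPrimeDown, if_pos hp]; omega
  | case2 n hp h1 => omega
  | case3 n hp h1 ih =>
    rw [nearestPrimeDown, if_neg hp, dif_neg h1]
    rcases (by omega : n = 2 ∨ 3 ≤ n) with h2 | h3
    · exfalso; subst h2; simp [isPrime] at hp
    · have := ih (by omega); omega

-- for num ≥ 3 it also stays ≥ 3 (it stops at 3 at the latest)
theorem nearestPrimeDown_bounds3 (num : Int) (h : 3 ≤ num) :
    3 ≤ nearestPrimeDown num ∧ nearestPrimeDown num ≤ num := by
  induction num using nearestPrimeDown.induct with
  | case1 n hp => rw [nearestPrimeDown, if_pos hp]; omega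
  | case2 n hp h1 => omega
  | case3 n hp h1 ih =>
    rw [nearestPrimeDown, if_neg hp, dif_neg h1]
    rcases (by omega : n = 3 ∨ 4 ≤ n) with h2 | h3
    · exfalso; subst h2; simp [isPrime] at hp
    · have := ih (by omega); omega

-- adding one step to the dividend adds one to the floor quotient
theorem floordiv_add_step (a s : Int) (hs : 0 < s) :
    PySem.Int.floordiv (a + s) s = PySem.Int.floordiv a s + 1 := by
  have hq := (PySem.Int.floordiv_eq_iff_of_pos (a := a) (b := s) hs).mp rfl
  rw [PySem.Int.floordiv_eq_iff_of_pos hs]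
  constructor <;> nlinarith [hq.1, hq.2]

-- characterization of the inner skip loop as a closed-form jump
theorem skipA_eq (lb s : Int) (hs : 0 < s) (c j : Int) :
    skipA lb s c j =
      (c + s * max 0 (-(PySem.Int.floordiv (c - lb) s)),
       j + max 0 (-(PySem.Int.floordiv (c - lb) s))) := by
  induction c, j using skipA.induct lb s with
  | case1 c j h ih =>
    obtain ⟨hc, -⟩ := h
    rw [skipA, dif_pos (And.intro hc hs), ih]
    have hstep : PySem.Int.floordiv (c + s - lb) s = PySem.Int.floordiv (c - lb) s + 1 := by
      have : c + s - lb = (c - lb) + s := by ring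
      rw [this, floordiv_add_step _ _ hs]
    have hneg : PySem.Int.floordiv (c - lb) s < 0 := by
      rw [PySem.Int.floordiv_lt_iff_lt_mul hs]; omega
    rw [hstep]
    have h1 : max 0 (-(PySem.Int.floordiv (c - lb) s + 1)) = -(PySem.Int.floordiv (c - lb) s) - 1 := by omega
    have h2 : max 0 (-(PySem.Int.floordiv (c - lb) s)) = -(PySem.Int.floordiv (c - lb) s) := by omega
    rw [h1, h2, Prod.mk.injEq]
    constructor
    · ring
    · ring
  | case2 c j h =>
    rw [skipA, dif_neg h]
    rcases (not_and_or.mp h) with hc | hs'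
    · have hge : 0 ≤ PySem.Int.floordiv (c - lb) s := by
        rw [PySem.Int.le_floordiv_iff_mul_le hs]; omega
      have : max 0 (-(PySem.Int.floordiv (c - lb) s)) = 0 := by omega
      rw [this]; simp
    · exact absurd hs hs'

-- tail of the outer loop once current has reached lower_bound, as a mapped range
theorem outerA_tail (ub lb add s : Int) (hs : 0 < s) (hm : PySem.Int.mod s ub = s) :
    ∀ (n : Nat) (j : Int), (ub - j).toNat ≤ n → lb ≤ s * (j + 1) →
      outerA ub lb add s (s * (j + 1)) j =
        (PySem.List.pyRange j ub 1).map (fun i => s * (i + 1) + add) := by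
  intro n
  induction n with
  | zero =>
    intro j hn hlb
    have hj : ¬ j < ub := by omega
    rw [outerA, dif_neg hj, PySem.List.pyRange_one_eq_nil (by omega)]
    simp
  | succ n ih =>
    intro j hn hlb
    by_cases hj : j < ub
    · rw [outerA, dif_pos hj, hm]
      have hnoskip : ¬ (s * (j + 1) + s < lb ∧ 0 < s) := by
        rintro ⟨h1, -⟩; linarith
      rw [skipA, dif_neg hnoskip]
      have hc : s * (j + 1) + s = s * ((j + 1) + 1) := by ring
      rw [hc]
      rw [ih (j + 1) (by omega) (by nlinarith)]
      rw [PySem.List.pyRange_one_cons hj, List.map_cons]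
    · rw [outerA, dif_neg hj, PySem.List.pyRange_one_eq_nil (by omega)]
      simp

-- ===== VERDICT (by name: the statement is the Claim_ definition above) =====
theorem number_generator_spec : Claim_equal_number_generator := by
  intro ub lb add rep _hdom hpre
  obtain ⟨h3, hrep⟩ := hpre
  subst hrep
  show number_generator ub lb add false = number_generator_alt ub lb add false
  rw [number_generator, number_generator_alt]
  simp only [Bool.false_eq_true, if_false, prevPrime_eq]
  set p := nearestPrimeDown ub with hpdef
  obtain ⟨hp3, hple⟩ := nearestPrimeDown_bounds3 ub h3
  rw [← hpdef] at hp3 hple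
  have h2m : 2 ≤ PySem.Int.floordiv (p * 3) 4 := by
    rw [PySem.Int.le_floordiv_iff_mul_le (by omega)]; nlinarith
  have hmp : PySem.Int.floordiv (p * 3) 4 < p := by
    rw [PySem.Int.floordiv_lt_iff_lt_mul (by omega)]; nlinarith
  set s := nearestPrimeDown (PySem.Int.floordiv (p * 3) 4) with hsdef
  obtain ⟨hs2, hsle⟩ := nearestPrimeDown_bounds _ h2m
  rw [← hsdef] at hs2 hsle
  have hsp : s < p := by omega
  have hs : (0 : Int) < s := by omega
  have hmod : PySem.Int.mod s p = s := by
    rw [PySem.Int.mod_eq_emod_of_pos (show (0:Int) < p by omega)]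
    exact Int.emod_eq_of_lt (by omega) hsp
  -- one unfolding of the outer loop: the unconditional first emission, then the skip
  rw [outerA, dif_pos (show (0:Int) < p by omega), hmod, skipA_eq lb s hs]
  have hstep : PySem.Int.floordiv (s + s - lb) s = PySem.Int.floordiv (s - lb) s + 1 := by
    have : s + s - lb = (s - lb) + s := by ring
    rw [this, floordiv_add_step _ _ hs]
  set q := PySem.Int.floordiv (s - lb) s with hqdef
  set K := max 0 (-(PySem.Int.floordiv (s + s - lb) s)) with hKdef
  have hK : K = max 0 (-(q + 1)) := by rw [hKdef, hstep]
  have ht : 0 + 1 + K = max 1 (-q) := by omega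
  -- the value after the skip is s * (t + 1) and it has reached lb
  have hbra := (PySem.Int.floordiv_eq_iff_of_pos (a := s - lb) (b := s) hs).mp rfl
  rw [← hqdef] at hbra
  have hcur : s + s + s * K = s * ((0 + 1 + K) + 1) := by ring
  have hreach : lb ≤ s * ((0 + 1 + K) + 1) := by
    rcases (by omega : K = 0 ∨ K = -(q + 1)) with h0 | h1
    · -- q ≥ -1, so lb ≤ 2s
      have hsk : s * K = 0 := by rw [h0]; ring
      have hq1 : -1 ≤ q := by omega
      nlinarith [hbra.1, hsk, hq1]
    · have hsk : s * K = s * (-(q + 1)) := by rw [h1]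
      nlinarith [hbra.1, hsk]
  simp only [hcur]
  rw [outerA_tail p lb add s hs hmod (p - (0 + 1 + K)).toNat (0 + 1 + K) (by omega) hreach]
  rw [ht]
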